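-- pv_equiv track=rewrite | github.com/kikugawa-shoma/Atcoder | ABC/ABC156/ABC156D.py | mod_inv_factorial
-- ===== SOURCE A (Python) =====
-- def mod_inv_factorial(n1, n2, m):
--     n = max(n1, n2)
--     invs = [0] * (n + 1)
--     invs[1] = 1
--     for i in range(2, n + 1):
--         invs[i] = m - invs[m % i] * (m//i) % m
--
--     r1 = 1
--     r2 = 1
--     for i in range(1, n1+1):
--         r1 *= invs[i]
--         r1 %= m
--     for i in range(1, n2+1):
--         r2 *= invs[i]
--         r2 %= m
--     return r1, r2
-- ===== SOURCE B (Python) =====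
-- def mod_inv_factorial(n1, n2, m):
--     # Top-down memoized recursion for the inverse recurrence (demand-driven,
--     # following the chain i -> m % i, with None marking 'not yet computed'),
--     # and one shared product: the smaller prefix is computed once and extended
--     # to the larger, instead of two independent product loops.
--     lo, hi = (n1, n2) if n1 <= n2 else (n2, n1)
--     memo = [None] * (hi + 1)
--     memo[0] = 0
--     memo[1] = 1
--
--     def inv(i):
--         if memo[i] is None:
--             memo[i] = m - inv(m % i) * (m // i) % m
--         return memo[i]
--
--     r = 1
--     for i in range(1, lo + 1):
--         r = r * inv(i) % m
--     rlo = r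
--     for i in range(max(lo, 0) + 1, hi + 1):
--         r = r * inv(i) % m
--     return (rlo, r) if n1 <= n2 else (r, rlo)
-- ===== Notes on version B (the rewrite author's own statement) =====
-- stated objective: alternative
-- what changed: A fills the inverse table bottom-up over an index loop and then runs two full independent product loops; B computes inverses by top-down memoized recursion on the chain i -> m % i (None-marked memo, demand-driven), and computes only one product, evaluating the shared prefix up to min(n1,n2) once and extending it to max(n1,n2).
import Mathlib
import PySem

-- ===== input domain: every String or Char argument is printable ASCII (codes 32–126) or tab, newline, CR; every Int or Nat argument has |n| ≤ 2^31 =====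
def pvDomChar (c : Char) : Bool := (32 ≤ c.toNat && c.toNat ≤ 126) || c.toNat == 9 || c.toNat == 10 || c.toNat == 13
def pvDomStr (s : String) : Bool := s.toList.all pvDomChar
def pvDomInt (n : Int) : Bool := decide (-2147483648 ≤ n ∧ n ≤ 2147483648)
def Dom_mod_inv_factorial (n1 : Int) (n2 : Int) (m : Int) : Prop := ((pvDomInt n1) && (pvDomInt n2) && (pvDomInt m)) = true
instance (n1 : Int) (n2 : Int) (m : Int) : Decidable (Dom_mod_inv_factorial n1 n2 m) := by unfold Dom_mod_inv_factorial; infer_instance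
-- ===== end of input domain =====

-- B replaces A's bottom-up table fill + two independent product loops by a top-down
-- memoized recursion on a dict plus one shared product extended from min(n1,n2) to
-- max(n1,n2) (objective: alternative, same O(n) cost).

-- ===== PORT A =====
-- Python list read xs[i] / write xs[i] = v on an int index, ported by hand on Array
-- (Python's list is an array): exact for 0 <= i < len(xs), and under Pre_ every
-- access A makes is in range.
def aGet (a : Array Int) (i : Int) : Int := a.getD i.toNat 0
def aSet (a : Array Int) (i : Int) (v : Int) : Array Int := a.setIfInBounds i.toNat v

-- body of A's first loop: invs[i] = m - invs[m % i] * (m//i) % m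
def invStepA (m : Int) (invs : Array Int) (i : Int) : Array Int :=
  aSet invs i
    (m - PySem.Int.mod (aGet invs (PySem.Int.mod m i) * PySem.Int.floordiv m i) m)

-- body of A's product loops: r *= invs[i]; r %= m
def prodStepA (m : Int) (invs : Array Int) (r : Int) (i : Int) : Int :=
  PySem.Int.mod (r * aGet invs i) m

def mod_inv_factorial (n1 : Int) (n2 : Int) (m : Int) : Int × Int :=
  let n := max n1 n2
  let invs := (PySem.List.pyRange 2 (n + 1) 1).foldl (invStepA m)
    (aSet (Array.replicate (n + 1).toNat 0) 1 1)
  let r1 := (PySem.List.pyRange 1 (n1 + 1) 1).foldl (prodStepA m invs) 1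
  let r2 := (PySem.List.pyRange 1 (n2 + 1) 1).foldl (prodStepA m invs) 1
  (r1, r2)

-- ===== PORT B =====
-- B's memo list [None]*(hi+1): reads/writes on an int index, ported by hand on
-- Array (Option Int) (exact for indices 0 <= i < len, which Pre_ guarantees here).
def bGet (a : Array (Option Int)) (i : Int) : Option Int := a.getD i.toNat none
def bSet (a : Array (Option Int)) (i : Int) (v : Option Int) : Array (Option Int) :=
  a.setIfInBounds i.toNat v

-- B's memoized recursive inv(i): thread the mutated memo through the recursion.
-- The 'else (memo, 0)' branch is a totality guard only: it is never reached on the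
-- admitted calls (0 and 1 are memoized, and for i ≥ 2 Python's m % i lies in [0, i)).
def invGo (m : Int) (memo : Array (Option Int)) (i : Int) : Array (Option Int) × Int :=
  match bGet memo i with
  | some v => (memo, v)
  | none =>
    let j := PySem.Int.mod m i
    if h : j.toNat < i.toNat then
      let r := invGo m memo j
      let v := m - PySem.Int.mod (r.2 * PySem.Int.floordiv m i) m
      (bSet r.1 i (some v), v)
    else (memo, 0)
termination_by i.toNat

-- body of B's product loops: r = r * inv(i) % m, threading the memo
def prodStepB (m : Int) (st : Array (Option Int) × Int) (i : Int) : Array (Option Int) × Int :=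
  let r := invGo m st.1 i
  (r.1, PySem.Int.mod (st.2 * r.2) m)

def mod_inv_factorial_alt (n1 : Int) (n2 : Int) (m : Int) : Int × Int :=
  let lo := if n1 ≤ n2 then n1 else n2
  let hi := if n1 ≤ n2 then n2 else n1
  let memo0 := bSet (bSet (Array.replicate (hi + 1).toNat none) 0 (some 0)) 1 (some 1)
  let s1 := (PySem.List.pyRange 1 (lo + 1) 1).foldl (prodStepB m) (memo0, 1)
  let s2 := (PySem.List.pyRange (max lo 0 + 1) (hi + 1) 1).foldl (prodStepB m) s1
  if n1 ≤ n2 then (s1.2, s2.2) else (s2.2, s1.2)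

-- ===== PRECONDITION & SPEC =====
-- Pre_ excludes exactly the inputs on which Python A raises: IndexError when
-- max(n1,n2) < 1 (invs[1] out of range) and ZeroDivisionError when m = 0.
def Pre_mod_inv_factorial (n1 : Int) (n2 : Int) (m : Int) : Prop :=
  1 ≤ max n1 n2 ∧ m ≠ 0
instance (n1 : Int) (n2 : Int) (m : Int) : Decidable (Pre_mod_inv_factorial n1 n2 m) := by
  unfold Pre_mod_inv_factorial; infer_instance
def pvWitness_mod_inv_factorial : Int × Int × Int := (3, 2, 7)

def Spec_mod_inv_factorial (n1 : Int) (n2 : Int) (m : Int) (out : Int × Int) : Prop := out = mod_inv_factorial_alt n1 n2 m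
instance (n1 : Int) (n2 : Int) (m : Int) (out : Int × Int) : Decidable (Spec_mod_inv_factorial n1 n2 m out) := by unfold Spec_mod_inv_factorial; infer_instance

-- ===== CLAIM (what is proved, stated in full; the proofs are below) =====
def Claim_equal_mod_inv_factorial : Prop := ∀ (n1 : Int) (n2 : Int) (m : Int), Dom_mod_inv_factorial n1 n2 m → Pre_mod_inv_factorial n1 n2 m → Spec_mod_inv_factorial n1 n2 m (mod_inv_factorial n1 n2 m)

-- ===== LEMMAS AND PROOFS =====

-- the value A's recurrence stores in invs[k] (invs[0] is never written and stays 0)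
def invVal (m : Int) (k : Nat) : Int :=
  if k = 0 then 0
  else if k = 1 then 1
  else m - PySem.Int.mod (invVal m (PySem.Int.mod m (k : Int)).toNat * PySem.Int.floordiv m (k : Int)) m
decreasing_by
  rename_i h0 h1
  have hk : (0:Int) < (k : Int) := by omega
  have h2 := PySem.Int.mod_nonneg m hk
  have h3 := PySem.Int.mod_lt m hk
  omega

-- the running product r after the first k factors, reduced mod m at each step
def prodF (m : Int) : Nat → Int
  | 0 => 1
  | k + 1 => PySem.Int.mod (prodF m k * invVal m (k + 1)) m

lemma invVal_zero (m : Int) : invVal m 0 = 0 := by rw [invVal]; simp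
lemma invVal_one (m : Int) : invVal m 1 = 1 := by rw [invVal]; simp
lemma invVal_two_le (m : Int) (k : Nat) (hk : 2 ≤ k) :
    invVal m k = m - PySem.Int.mod (invVal m (PySem.Int.mod m (k : Int)).toNat * PySem.Int.floordiv m (k : Int)) m := by
  rw [invVal]
  simp [show k ≠ 0 by omega, show k ≠ 1 by omega]

lemma prodF_of_nonpos (m t : Int) (h : t ≤ 0) : prodF m t.toNat = 1 := by
  rw [show t.toNat = 0 by omega]; rfl

lemma aGet_eq_getElem (a : Array Int) (i : Int) (h : i.toNat < a.size) :
    aGet a i = a[i.toNat] := by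
  unfold aGet
  rw [Array.getD_eq_getD_getElem?, Array.getElem?_eq_getElem h]
  rfl

-- the table invariant: size N, and entries 0..j hold invVal
def InvsOK (m : Int) (N : Nat) (j : Int) (L : Array Int) : Prop :=
  L.size = N ∧ ∀ k : Int, 0 ≤ k → k ≤ j →
    aGet L k = invVal m k.toNat

lemma InvsOK_set (m : Int) (N : Nat) (j : Int) (L : Array Int) (h : InvsOK m N j L)
    (hj : 0 ≤ j) (hN : (j + 1).toNat < N) (v : Int) (hv : v = invVal m (j + 1).toNat) :
    InvsOK m N (j + 1) (aSet L (j + 1) v) := by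
  obtain ⟨hlen, hget⟩ := h
  unfold InvsOK aSet
  refine ⟨by simp [hlen], ?_⟩
  intro k hk0 hk
  have hsz : k.toNat < L.size := by rw [hlen]; omega
  rw [aGet_eq_getElem (L.setIfInBounds (j + 1).toNat v) k
        (by rw [Array.size_setIfInBounds, hlen]; omega),
      Array.getElem_setIfInBounds hsz]
  by_cases hkj : k = j + 1
  · have he : (j + 1).toNat = k.toNat := by omega
    simp [he, hv, hkj]
  · have hne : (j + 1).toNat ≠ k.toNat := by omega
    rw [if_neg hne, ← aGet_eq_getElem L k (by rw [hlen]; omega)]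
    exact hget k hk0 (by omega)

-- the value A's recurrence computes at index i = j+1 ≥ 2, read from a table good up to j
lemma recVal_eq (m : Int) (N : Nat) (j i : Int) (L : Array Int) (h : InvsOK m N j L)
    (hi : i = j + 1) (hi2 : 2 ≤ i) :
    m - PySem.Int.mod (aGet L (PySem.Int.mod m i) * PySem.Int.floordiv m i) m
      = invVal m i.toNat := by
  have hipos : (0:Int) < i := by omega
  have h1 := PySem.Int.mod_nonneg m hipos
  have h2 := PySem.Int.mod_lt m hipos
  rw [h.2 (PySem.Int.mod m i) h1 (by omega)]
  rw [invVal_two_le m i.toNat (by omega)]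
  have he : ((i.toNat : Int)) = i := by omega
  rw [he]

-- A's first loop builds the invVal table
lemma invsA_char (m n : Int) (hn : 1 ≤ n) (j : Int) (hj1 : 1 ≤ j) : j ≤ n →
    InvsOK m (n + 1).toNat j
      ((PySem.List.pyRange 2 (j + 1) 1).foldl (invStepA m)
        (aSet (Array.replicate (n + 1).toNat 0) 1 1)) := by
  induction j, hj1 using Int.le_induction with
  | base =>
    intro hjn
    rw [PySem.List.pyRange_one_eq_nil (by omega), List.foldl_nil]
    unfold InvsOK aSet
    refine ⟨by simp, ?_⟩
    intro k hk0 hk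
    rcases (show k = 0 ∨ k = 1 by omega) with hk' | hk' <;> subst hk'
    · simp [aGet, Array.getD_eq_getD_getElem?, Array.size_replicate, invVal_zero, show 0 < (n + 1).toNat by omega]
    · simp [aGet, Array.getD_eq_getD_getElem?, Array.size_replicate, invVal_one, show 1 < (n + 1).toNat by omega]
  | succ j hj1 ih =>
    intro hjn
    rw [PySem.List.pyRange_one_succ_right (by omega), List.foldl_append,
        List.foldl_cons, List.foldl_nil]
    have hprev := ih (by omega)
    unfold invStepA
    exact InvsOK_set m _ j _ hprev (by omega) (by omega) _
      (recVal_eq m _ j (j + 1) _ hprev rfl (by omega))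

-- A's product loop over a good table computes prodF
lemma prodA_char (m n : Int) (L : Array Int) (h : InvsOK m (n + 1).toNat n L)
    (t : Int) (ht : t ≤ n) :
    (PySem.List.pyRange 1 (t + 1) 1).foldl (prodStepA m L) 1 = prodF m t.toNat := by
  by_cases h1 : 1 ≤ t
  · revert ht
    induction t, h1 using Int.le_induction with
    | base =>
      intro _
      rw [PySem.List.pyRange_one_cons (by omega), PySem.List.pyRange_one_eq_nil (by omega),
          List.foldl_cons, List.foldl_nil]
      unfold prodStepA
      rw [h.2 1 (by omega) (by omega)]
      norm_num [prodF, invVal_one]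
    | succ t ht1 ih =>
      intro htn
      rw [PySem.List.pyRange_one_succ_right (by omega), List.foldl_append,
          List.foldl_cons, List.foldl_nil, ih (by omega)]
      unfold prodStepA
      rw [h.2 (t + 1) (by omega) (by omega)]
      have he : (t + 1).toNat = t.toNat + 1 := by omega
      rw [he, prodF]
  · rw [PySem.List.pyRange_one_eq_nil (by omega), List.foldl_nil,
        prodF_of_nonpos m t (by omega)]

-- B's memo invariant: size N, entries 0 and 1 set, every set entry holds invVal
def MemoOK (m : Int) (N : Nat) (d : Array (Option Int)) : Prop :=
  d.size = N ∧ bGet d 0 = some 0 ∧ bGet d 1 = some 1 ∧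
  ∀ k v, bGet d k = some v → v = invVal m k.toNat

lemma bGet_eq_getElem (a : Array (Option Int)) (i : Int) (h : i.toNat < a.size) :
    bGet a i = a[i.toNat] := by
  unfold bGet
  rw [Array.getD_eq_getD_getElem?, Array.getElem?_eq_getElem h]
  rfl

lemma memoOK_insert (m : Int) (N : Nat) (d : Array (Option Int)) (h : MemoOK m N d)
    (i : Int) (hi2 : 2 ≤ i) (hiN : i.toNat < N) (v : Int) (hv : v = invVal m i.toNat) :
    MemoOK m N (bSet d i (some v)) := by
  obtain ⟨hsz, h0, h1, hall⟩ := h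
  have hset : ∀ k : Int, k.toNat < N →
      bGet (bSet d i (some v)) k
        = if i.toNat = k.toNat then some v else bGet d k := by
    intro k hk
    unfold bSet
    rw [bGet_eq_getElem _ k (by rw [Array.size_setIfInBounds, hsz]; omega),
        Array.getElem_setIfInBounds (by rw [hsz]; omega)]
    by_cases he : i.toNat = k.toNat
    · rw [if_pos he, if_pos he]
    · rw [if_neg he, if_neg he, ← bGet_eq_getElem d k (by rw [hsz]; omega)]
  refine ⟨by simp [bSet, hsz], ?_, ?_, ?_⟩
  · rw [hset 0 (by omega), if_neg (by omega)]; exact h0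
  · rw [hset 1 (by omega), if_neg (by omega)]; exact h1
  · intro k w hw
    by_cases hk : k.toNat < N
    · rw [hset k hk] at hw
      by_cases he : i.toNat = k.toNat
      · rw [if_pos he] at hw; cases hw; rw [hv, he]
      · rw [if_neg he] at hw; exact hall k w hw
    · exfalso
      unfold bSet bGet at hw
      rw [Array.getD_eq_getD_getElem?, Array.getElem?_eq_none
            (by rw [Array.size_setIfInBounds, hsz]; omega)] at hw
      cases hw

-- B's memoized recursion returns invVal and preserves the invariant
lemma invGo_spec (m : Int) (N : Nat) : ∀ (F : Nat) (i : Int) (d : Array (Option Int)),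
    i.toNat ≤ F → 0 ≤ i → i.toNat < N → MemoOK m N d →
    (invGo m d i).2 = invVal m i.toNat ∧ MemoOK m N (invGo m d i).1 := by
  intro F
  induction F with
  | zero =>
    intro i d hF hi hN h
    have hi0 : i = 0 := by omega
    subst hi0
    rw [invGo, h.2.1]
    exact ⟨(invVal_zero m).symm, h⟩
  | succ F ih =>
    intro i d hF hi hN h
    rw [invGo]
    cases hget : bGet d i with
    | some v =>
      exact ⟨h.2.2.2 i v hget, h⟩
    | none =>
      have hi2 : 2 ≤ i := by
        rcases (show i = 0 ∨ i = 1 ∨ 2 ≤ i by omega) with h' | h' | h'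
        · rw [h', h.2.1] at hget; cases hget
        · rw [h', h.2.2.1] at hget; cases hget
        · exact h'
      have hipos : (0:Int) < i := by omega
      have hj0 := PySem.Int.mod_nonneg m hipos
      have hjlt := PySem.Int.mod_lt m hipos
      have hguard : (PySem.Int.mod m i).toNat < i.toNat := by omega
      rw [dif_pos hguard]
      obtain ⟨hveq, hmOK⟩ := ih (PySem.Int.mod m i) d (by omega) hj0 (by omega) h
      simp only [hveq]
      have hval : m - PySem.Int.mod (invVal m (PySem.Int.mod m i).toNat * PySem.Int.floordiv m i) m
          = invVal m i.toNat := by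
        rw [invVal_two_le m i.toNat (by omega)]
        have he : ((i.toNat : Int)) = i := by omega
        rw [he]
      exact ⟨hval, memoOK_insert m N _ hmOK i hi2 hN _ hval⟩

-- B's product loop from prefix value prodF s over range(s+1, t+1) reaches prodF (max s t)
lemma foldB_char (m n : Int) (s : Int) (hs : 0 ≤ s) (t : Int) (d : Array (Option Int))
    (h : MemoOK m (n + 1).toNat d) : t ≤ n →
    MemoOK m (n + 1).toNat
      (((PySem.List.pyRange (s + 1) (t + 1) 1).foldl (prodStepB m) (d, prodF m s.toNat)).1) ∧
    ((PySem.List.pyRange (s + 1) (t + 1) 1).foldl (prodStepB m) (d, prodF m s.toNat)).2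
      = prodF m (max s t).toNat := by
  by_cases hts : t ≤ s
  · intro _
    rw [PySem.List.pyRange_one_eq_nil (by omega), List.foldl_nil]
    exact ⟨h, by rw [max_eq_left hts]⟩
  · have hst : s ≤ t := by omega
    clear hts
    induction t, hst using Int.le_induction with
    | base =>
      intro _
      rw [PySem.List.pyRange_one_eq_nil (by omega), List.foldl_nil]
      exact ⟨h, by rw [max_self]⟩
    | succ t hst ih =>
      intro htn
      rw [PySem.List.pyRange_one_succ_right (by omega), List.foldl_append,
          List.foldl_cons, List.foldl_nil]
      obtain ⟨hm1, hval⟩ := ih (by omega)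
      set S := (PySem.List.pyRange (s + 1) (t + 1) 1).foldl (prodStepB m) (d, prodF m s.toNat)
      simp only [prodStepB]
      obtain ⟨hv, hmOK⟩ := invGo_spec m (n + 1).toNat (t + 1).toNat (t + 1) S.1
        le_rfl (by omega) (by omega) hm1
      refine ⟨hmOK, ?_⟩
      rw [hv, hval, max_eq_right (by omega), max_eq_right (by omega)]
      have he : (t + 1).toNat = t.toNat + 1 := by omega
      rw [he, prodF]

lemma bGet_none_of_ge (a : Array (Option Int)) (k : Int) (h : a.size ≤ k.toNat) :
    bGet a k = none := by
  unfold bGet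
  rw [Array.getD_eq_getD_getElem?, Array.getElem?_eq_none h]
  rfl

lemma memoOK_init (m hi : Int) (hhi : 1 ≤ hi) :
    MemoOK m (hi + 1).toNat
      (bSet (bSet (Array.replicate (hi + 1).toNat none) 0 (some 0)) 1 (some 1)) := by
  have hN2 : 2 ≤ (hi + 1).toNat := by omega
  have hsz : (bSet (bSet (Array.replicate (hi + 1).toNat (none : Option Int)) 0 (some 0)) 1 (some 1)).size
      = (hi + 1).toNat := by simp [bSet]
  have hread : ∀ k : Int, k.toNat < (hi + 1).toNat →
      bGet (bSet (bSet (Array.replicate (hi + 1).toNat (none : Option Int)) 0 (some 0)) 1 (some 1)) k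
        = if k.toNat = 1 then some 1 else if k.toNat = 0 then some 0 else none := by
    intro k hk
    rw [bGet_eq_getElem _ k (by rw [hsz]; omega)]
    unfold bSet
    rw [Array.getElem_setIfInBounds (by simpa using hk),
        Array.getElem_setIfInBounds (by simpa using hk)]
    simp only [Int.toNat_one, Int.toNat_zero, Array.getElem_replicate]
    split_ifs with h1 h2 h1' h1' h0 <;> first | rfl | omega
  refine ⟨hsz, ?_, ?_, ?_⟩
  · rw [hread 0 (by omega)]; norm_num
  · rw [hread 1 (by omega)]; norm_num
  · intro k v hv
    by_cases hk : k.toNat < (hi + 1).toNat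
    · rw [hread k hk] at hv
      split_ifs at hv with h1 h0
      · cases hv; rw [h1]; norm_num [invVal_one]
      · cases hv; rw [h0]; norm_num [invVal_zero]
    · rw [bGet_none_of_ge _ k (by rw [hsz]; omega)] at hv; cases hv

-- the shared-prefix double product of B, for ordered bounds lo ≤ hi
lemma coreB (m lo hi : Int) (hlohi : lo ≤ hi) (hhi1 : 1 ≤ hi) :
    ((PySem.List.pyRange 1 (lo + 1) 1).foldl (prodStepB m)
        (bSet (bSet (Array.replicate (hi + 1).toNat none) 0 (some 0)) 1 (some 1), 1)).2
      = prodF m lo.toNat ∧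
    ((PySem.List.pyRange (max lo 0 + 1) (hi + 1) 1).foldl (prodStepB m)
        ((PySem.List.pyRange 1 (lo + 1) 1).foldl (prodStepB m)
          (bSet (bSet (Array.replicate (hi + 1).toNat none) 0 (some 0)) 1 (some 1), 1))).2
      = prodF m hi.toNat := by
  have h1 := foldB_char m hi 0 le_rfl lo _ (memoOK_init m hi hhi1) hlohi
  rw [show ((0:Int) + 1) = 1 by ring, show prodF m (0:Int).toNat = 1 from rfl] at h1
  set S1 := (PySem.List.pyRange 1 (lo + 1) 1).foldl (prodStepB m)
    (bSet (bSet (Array.replicate (hi + 1).toNat none) 0 (some 0)) 1 (some 1), 1) with hS1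
  have hfst : S1.2 = prodF m lo.toNat := by
    rw [h1.2, show (max 0 lo).toNat = lo.toNat by omega]
  refine ⟨hfst, ?_⟩
  have hS1pair : S1 = (S1.1, prodF m (max lo 0).toNat) := by
    rw [show (max lo 0).toNat = lo.toNat by omega, ← hfst]
  have h2 := foldB_char m hi (max lo 0) (by omega) hi S1.1 h1.1 le_rfl
  rw [← hS1pair] at h2
  rw [h2.2, show max (max lo 0) hi = hi by omega]

-- B computes (prodF n1, prodF n2)
lemma altB_char (n1 n2 m : Int) (hn : 1 ≤ max n1 n2) :
    mod_inv_factorial_alt n1 n2 m = (prodF m n1.toNat, prodF m n2.toNat) := by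
  by_cases hc : n1 ≤ n2
  · have h := coreB m n1 n2 hc (by omega)
    simp only [mod_inv_factorial_alt, if_pos hc]
    rw [h.1, h.2]
  · have h := coreB m n2 n1 (by omega) (by omega)
    simp only [mod_inv_factorial_alt, if_neg hc]
    rw [h.1, h.2]

-- ===== VERDICT (by name: the statement is the Claim_ definition above) =====
theorem mod_inv_factorial_spec : Claim_equal_mod_inv_factorial := by
  intro n1 n2 m _hdom hpre
  obtain ⟨hn, hm⟩ := hpre
  unfold Spec_mod_inv_factorial
  simp only [mod_inv_factorial]
  have hA := invsA_char m (max n1 n2) hn (max n1 n2) hn le_rfl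
  rw [prodA_char m (max n1 n2) _ hA n1 (le_max_left _ _),
      prodA_char m (max n1 n2) _ hA n2 (le_max_right _ _),
      altB_char n1 n2 m hn]
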